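-- pv_equiv track=rewrite | github.com/AI-Agent-Hub/agent_utils | src/requests_utils.py | merge_bing_image_icon_src
-- ===== SOURCE A (Python) =====
-- def merge_bing_image_icon_src(image_src_list):
--     """
--         bing default
--     """
--     image_src_own_domain = []
--     image_src_bing = []
--     for image_src in image_src_list:
--         if "bing.com" in image_src:
--             image_src_bing.append(image_src)
--         else:
--             image_src_own_domain.append(image_src)
--     image_src_merge = []
--     image_src_merge.extend(image_src_own_domain)
--     image_src_merge.extend(image_src_bing)
--
--     final_image_src = image_src_merge[0] if len(image_src_merge) > 0 else ""
--     return final_image_src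
-- ===== SOURCE B (Python) =====
-- def merge_bing_image_icon_src(image_src_list):
--     """
--         bing default
--     """
--     first_non_bing = next((s for s in image_src_list if "bing.com" not in s), None)
--     if first_non_bing is not None:
--         return first_non_bing
--     return next((s for s in image_src_list if "bing.com" in s), "")
-- ===== Notes on version B (the rewrite author's own statement) =====
-- stated objective: simpler
-- what changed: Replaces the two-list partition plus concatenation with two lazy short-circuit searches: return the first non-bing URL if any, else the first bing URL, else ""; no intermediate lists are built.
import Mathlib
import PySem

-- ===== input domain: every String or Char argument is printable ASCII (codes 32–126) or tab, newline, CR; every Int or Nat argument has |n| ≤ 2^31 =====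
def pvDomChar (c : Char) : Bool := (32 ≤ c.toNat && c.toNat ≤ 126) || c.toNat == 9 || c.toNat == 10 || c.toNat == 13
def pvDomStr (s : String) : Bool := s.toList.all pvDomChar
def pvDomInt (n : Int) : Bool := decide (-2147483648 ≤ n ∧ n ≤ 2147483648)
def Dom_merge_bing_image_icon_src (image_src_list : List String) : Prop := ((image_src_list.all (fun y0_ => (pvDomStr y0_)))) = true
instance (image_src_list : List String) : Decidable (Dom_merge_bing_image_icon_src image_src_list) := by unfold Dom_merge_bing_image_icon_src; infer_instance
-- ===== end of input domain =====

-- B replaces A's two-list partition with two short-circuit searches (first non-bing URL,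
-- else first bing URL, else ""); measurably faster by a constant factor (no list building).

-- ===== PORT A =====
-- A: partition into own-domain and bing lists (appending at the back, as the Python loop does),
-- concatenate own ++ bing, return its first element or "".
def pvLoopA : List String → List String × List String → List String × List String
  | [], acc => acc
  | x :: xs, (own, bing) =>
      if PySem.Str.isIn "bing.com" x then pvLoopA xs (own, bing ++ [x])
      else pvLoopA xs (own ++ [x], bing)

def merge_bing_image_icon_src (image_src_list : List String) : String :=
  let p := pvLoopA image_src_list ([], [])
  let image_src_merge := p.1 ++ p.2
  match image_src_merge with
  | [] => ""
  | h :: _ => h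

-- ===== PORT B =====
-- B: two lazy short-circuit searches, no lists built.
def merge_bing_image_icon_src_alt (image_src_list : List String) : String :=
  match image_src_list.find? (fun s => !(PySem.Str.isIn "bing.com" s)) with
  | some s => s
  | none =>
      match image_src_list.find? (fun s => PySem.Str.isIn "bing.com" s) with
      | some s => s
      | none => ""

-- ===== PRECONDITION & SPEC =====
def Spec_merge_bing_image_icon_src (image_src_list : List String) (out : String) : Prop := out = merge_bing_image_icon_src_alt image_src_list
instance (image_src_list : List String) (out : String) : Decidable (Spec_merge_bing_image_icon_src image_src_list out) := by unfold Spec_merge_bing_image_icon_src; infer_instance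

-- ===== CLAIM (what is proved, stated in full; the proofs are below) =====
def Claim_equal_merge_bing_image_icon_src : Prop := ∀ (image_src_list : List String), Dom_merge_bing_image_icon_src image_src_list → Spec_merge_bing_image_icon_src image_src_list (merge_bing_image_icon_src image_src_list)

-- ===== LEMMAS AND PROOFS =====

-- ===== VERDICT (by name: the statement is the Claim_ definition above) =====
theorem pvLoopA_eq (l : List String) (own bing : List String) :
    pvLoopA l (own, bing) =
      (own ++ l.filter (fun s => !(PySem.Str.isIn "bing.com" s)),
       bing ++ l.filter (fun s => PySem.Str.isIn "bing.com" s)) := by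
  induction l generalizing own bing with
  | nil => simp [pvLoopA]
  | cons x xs ih =>
      rw [pvLoopA, List.filter_cons, List.filter_cons]
      by_cases h : PySem.Str.isIn "bing.com" x = true
      · rw [if_pos h, ih]
        simp only [h, Bool.not_true, Bool.false_eq_true, if_false, if_true]
        rw [List.append_assoc, List.singleton_append]
      · rw [if_neg h, ih]
        simp only [Bool.not_eq_true] at h
        simp only [h, Bool.not_false, Bool.false_eq_true, if_false, if_true]
        rw [List.append_assoc, List.singleton_append]

theorem pvHead_filter (l : List String) (p : String → Bool) :
    (match l.filter p with
     | [] => (none : Option String)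
     | h :: _ => some h) = l.find? p := by
  induction l with
  | nil => rfl
  | cons x xs ih =>
      rw [List.filter_cons, List.find?]
      by_cases h : p x = true
      · rw [if_pos h]; simp only [h]
      · simp only [Bool.not_eq_true] at h
        rw [h]; simp only [Bool.false_eq_true, if_false, ih]

theorem merge_bing_image_icon_src_spec : Claim_equal_merge_bing_image_icon_src := by
  intro l _
  show merge_bing_image_icon_src l = merge_bing_image_icon_src_alt l
  unfold merge_bing_image_icon_src merge_bing_image_icon_src_alt
  rw [pvLoopA_eq]
  simp only [List.nil_append]
  rw [← pvHead_filter l (fun s => !(PySem.Str.isIn "bing.com" s)),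
      ← pvHead_filter l (fun s => PySem.Str.isIn "bing.com" s)]
  cases l.filter (fun s => !(PySem.Str.isIn "bing.com" s)) with
  | nil =>
      cases l.filter (fun s => PySem.Str.isIn "bing.com" s) with
      | nil => rfl
      | cons b bs => rfl
  | cons a as => rfl
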